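-- pv_equiv track=rewrite | github.com/jyunkim/algorithm | programmers/그리디/단속카메라.py | solution
-- ===== SOURCE A (Python) =====
-- def solution(routes):
--     answer = 0
--     routes.sort(key=lambda x: x[1], reverse=True)
--     # 가장 먼저 나가는 차량의 진출 시점에 카메라를 설치한 후
--     # 해당 카메라와 만날 수 있는 차량들을 제거한다.
--     while routes:
--         camera = routes.pop()[1]
--         # 제거 시 리스트의 복사본을 이용하여 index 문제 없이 제거
--         for route in routes[:]:
--             if route[0] <= camera and route[1] >= camera:
--                 routes.remove(route)
--         answer += 1
--     return answer
-- ===== SOURCE B (Python) =====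
-- def solution(routes):
--     # Single-pass greedy: sweep routes in increasing exit order
--     # (same tie order as A: reversed stable descending sort), placing a new
--     # camera at a route's exit whenever the route starts after the last camera.
--     cnt = 0
--     last = None
--     for route in reversed(sorted(routes, key=lambda x: x[1], reverse=True)):
--         if last is None or route[0] > last:
--             cnt += 1
--             last = route[1]
--     return cnt
-- ===== Notes on version B (the rewrite author's own statement) =====
-- stated objective: alternative
-- what changed: A repeatedly pops the minimum-exit route and rescans/removes covered routes from the remaining list; B sorts once by exit time and makes a single greedy pass tracking the last camera position.
import Mathlib
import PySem

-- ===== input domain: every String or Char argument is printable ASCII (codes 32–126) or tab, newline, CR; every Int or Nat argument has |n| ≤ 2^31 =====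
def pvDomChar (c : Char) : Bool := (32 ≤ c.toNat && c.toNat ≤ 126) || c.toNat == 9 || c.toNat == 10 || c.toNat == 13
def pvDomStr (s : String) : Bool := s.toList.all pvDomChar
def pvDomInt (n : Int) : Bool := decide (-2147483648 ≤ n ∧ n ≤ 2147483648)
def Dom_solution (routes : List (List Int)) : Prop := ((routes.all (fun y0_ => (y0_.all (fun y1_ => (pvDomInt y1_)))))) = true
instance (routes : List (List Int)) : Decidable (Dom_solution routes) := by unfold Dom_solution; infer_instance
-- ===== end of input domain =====

-- B replaces A's pop-and-remove loop by a sort-by-exit single greedy pass;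
-- equivalence is about the return value only: Python A sorts and empties its argument list in place, B does not mutate it.


-- ===== PORT A =====
-- route[1] / route[0]; Pre_solution guarantees the index is in range, so getD 0 is never taken on admitted inputs
def pvKey (x : List Int) : Int := (PySem.List.pyGet? x 1).getD 0
def pvStart (x : List Int) : Int := (PySem.List.pyGet? x 0).getD 0
-- the condition of A's inner `if route[0] <= camera and route[1] >= camera`
def pvCov (camera : Int) (r : List Int) : Bool := decide (pvStart r ≤ camera) && decide (camera ≤ pvKey r)
-- A's inner `for route in routes[:]: if …: routes.remove(route)` — iterate over the copy, removing from the live list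
def pvRemoveLoop (camera : Int) : List (List Int) → List (List Int) → List (List Int)
  | [], lst => lst
  | r :: rest, lst =>
      pvRemoveLoop camera rest (if pvCov camera r then (PySem.List.remove? lst r).getD lst else lst)
      -- Python's remove raises ValueError when absent; here the element is always present, getD is a totality guard

lemma pvRemoveLoop_length_le (camera : Int) :
    ∀ (copy lst : List (List Int)), (pvRemoveLoop camera copy lst).length ≤ lst.length := by
  intro copy
  induction copy with
  | nil => intro lst; simp [pvRemoveLoop]
  | cons r rest ih =>
      intro lst
      simp only [pvRemoveLoop]
      refine le_trans (ih _) ?_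
      split
      · cases h : PySem.List.remove? lst r with
        | none => simp
        | some l' =>
            have : l' = lst.erase r := by
              have hm : r ∈ lst := by
                by_contra hn
                rw [(PySem.List.remove?_eq_none_iff lst r).2 hn] at h; cases h
              rw [PySem.List.remove?_eq_some_erase lst r hm] at h; exact (Option.some.inj h).symm
            simp only [this, Option.getD_some]
            exact le_trans List.length_erase_le (by omega)
      · simp

-- A's `while routes: camera = routes.pop()[1]; …; answer += 1`
def pvWhileLoop (lst : List (List Int)) (answer : Int) : Int :=
  match h : PySem.List.pop? lst (-1) with
  | none => answer
  | some pr =>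
      pvWhileLoop (pvRemoveLoop (pvKey pr.1) pr.2 pr.2) (answer + 1)
termination_by lst.length
decreasing_by
  have hl := PySem.List.length_of_pop?_eq_some lst h
  have := pvRemoveLoop_length_le (pvKey pr.1) pr.2 pr.2
  omega

def solution (routes : List (List Int)) : Int :=
  pvWhileLoop (PySem.List.sorted routes pvKey true) 0

-- ===== PORT B =====
-- one greedy step: place a new camera at route's exit when the route starts after the last camera
def pvAltStep (st : Int × Option Int) (route : List Int) : Int × Option Int :=
  match st.2 with
  | none => (st.1 + 1, some ((PySem.List.pyGet? route 1).getD 0))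
  | some last =>
      if last < (PySem.List.pyGet? route 0).getD 0 then
        (st.1 + 1, some ((PySem.List.pyGet? route 1).getD 0))
      else st

def solution_alt (routes : List (List Int)) : Int :=
  (((PySem.List.sorted routes (fun x => (PySem.List.pyGet? x 1).getD 0) true).reverse).foldl
      pvAltStep (0, none)).1

-- ===== PRECONDITION & SPEC =====
-- A reads route[1] (sort key) and route[0] of every route and raises IndexError on a route
-- shorter than 2; Pre_ admits exactly the inputs where every route has at least two entries.
def Pre_solution (routes : List (List Int)) : Prop := ∀ r ∈ routes, 2 ≤ r.length
instance (routes : List (List Int)) : Decidable (Pre_solution routes) := by unfold Pre_solution; infer_instance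
def pvWitness_solution : List (List Int) := [[-20, -15], [-14, -5], [0, 3000]]

def Spec_solution (routes : List (List Int)) (out : Int) : Prop := out = solution_alt routes
instance (routes : List (List Int)) (out : Int) : Decidable (Spec_solution routes out) := by unfold Spec_solution; infer_instance

-- ===== CLAIM (what is proved, stated in full; the proofs are below) =====
def Claim_equal_solution : Prop := ∀ (routes : List (List Int)), Dom_solution routes → Pre_solution routes → Spec_solution routes (solution routes)

-- ===== LEMMAS AND PROOFS =====

-- the inner removal loop, run on a copy of the live list, is exactly a filter
lemma pvRemoveLoop_inv (camera : Int) :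
    ∀ (copy pre : List (List Int)), (∀ x ∈ pre, pvCov camera x = false) →
      pvRemoveLoop camera copy (pre ++ copy) = pre ++ copy.filter (fun r => !pvCov camera r) := by
  intro copy
  induction copy with
  | nil => intro pre h; simp [pvRemoveLoop]
  | cons r rest ih =>
      intro pre h
      by_cases hc : pvCov camera r = true
      · have hr : r ∉ pre := fun hm => by simpa [hc] using h r hm
        have hrm : PySem.List.remove? (pre ++ r :: rest) r = some (pre ++ rest) := by
          rw [PySem.List.remove?_eq_some_erase _ r (by simp),
            List.erase_append_right _ hr, List.erase_cons_head]
        simp only [pvRemoveLoop, hc, if_true, hrm, Option.getD_some, List.filter_cons,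
          Bool.not_true, if_false, Bool.false_eq_true]
        exact ih pre h
      · have hc' : pvCov camera r = false := by simpa using hc
        have hpre : ∀ x ∈ pre ++ [r], pvCov camera x = false := by
          intro x hx
          rcases List.mem_append.1 hx with hx | hx
          · exact h x hx
          · rw [List.mem_singleton.1 hx]; exact hc'
        have heq : pre ++ r :: rest = (pre ++ [r]) ++ rest := by simp
        simp only [pvRemoveLoop, hc', if_false, Bool.false_eq_true, List.filter_cons,
          Bool.not_false, if_true, heq]
        rw [ih (pre ++ [r]) hpre]
        simp

lemma pvRemoveLoop_self (camera : Int) (l : List (List Int)) :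
    pvRemoveLoop camera l l = l.filter (fun r => !pvCov camera r) := by
  simpa using pvRemoveLoop_inv camera l [] (by simp)

-- skipping the routes covered by an already-placed camera does not change the greedy pass
lemma pvGreedy_filter (c : Int) :
    ∀ (S : List (List Int)) (a l : Int), c ≤ l → (∀ x ∈ S, c ≤ pvKey x) →
      ((S.filter (fun r => !pvCov c r)).foldl pvAltStep (a, some l)).1
        = (S.foldl pvAltStep (a, some l)).1 := by
  intro S
  induction S with
  | nil => intro a l _ _; simp
  | cons x rest ih =>
      intro a l hcl hk
      have hkx : c ≤ pvKey x := hk x (List.mem_cons_self ..)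
      by_cases hcov : pvCov c x = true
      · have hsx : pvStart x ≤ c := by
          have := hcov; unfold pvCov at this; simp at this; exact this.1
        have hskip : pvAltStep (a, some l) x = (a, some l) := by
          simp [pvAltStep, pvStart] at *
          omega
        simp only [List.filter_cons, hcov, Bool.not_true, Bool.false_eq_true, if_false,
          List.foldl_cons, hskip]
        exact ih a l hcl (fun y hy => hk y (List.mem_cons_of_mem _ hy))
      · have hcov' : pvCov c x = false := by simpa using hcov
        simp only [List.filter_cons, hcov', Bool.not_false, if_true, List.foldl_cons]
        by_cases hlt : l < pvStart x
        · have hstep : pvAltStep (a, some l) x = (a + 1, some (pvKey x)) := by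
            simp [pvAltStep, pvStart, pvKey] at *
            omega
          rw [hstep]
          exact ih (a + 1) (pvKey x) hkx (fun y hy => hk y (List.mem_cons_of_mem _ hy))
        · have hstep : pvAltStep (a, some l) x = (a, some l) := by
            simp [pvAltStep, pvStart] at *
            omega
          rw [hstep]
          exact ih a l hcl (fun y hy => hk y (List.mem_cons_of_mem _ hy))

lemma pvGreedy_start (c : Int) :
    ∀ (S : List (List Int)) (a : Int), (∀ x ∈ S, c ≤ pvKey x) →
      ((S.filter (fun r => !pvCov c r)).foldl pvAltStep (a, none)).1
        = (S.foldl pvAltStep (a, some c)).1 := by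
  intro S
  induction S with
  | nil => intro a _; simp
  | cons x rest ih =>
      intro a hk
      have hkx : c ≤ pvKey x := hk x (List.mem_cons_self ..)
      by_cases hcov : pvCov c x = true
      · have hsx : pvStart x ≤ c := by
          have := hcov; unfold pvCov at this; simp at this; exact this.1
        have hskip : pvAltStep (a, some c) x = (a, some c) := by
          simp [pvAltStep, pvStart] at *
          omega
        simp only [List.filter_cons, hcov, Bool.not_true, Bool.false_eq_true, if_false,
          List.foldl_cons, hskip]
        exact ih a (fun y hy => hk y (List.mem_cons_of_mem _ hy))
      · have hsx : c < pvStart x := by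
          unfold pvCov at hcov; simp at hcov; omega
        have hstep1 : pvAltStep (a, none) x = (a + 1, some (pvKey x)) := by
          simp [pvAltStep, pvKey]
        have hstep2 : pvAltStep (a, some c) x = (a + 1, some (pvKey x)) := by
          simp [pvAltStep, pvStart, pvKey] at *
          omega
        have hcov' : pvCov c x = false := by simpa using hcov
        simp only [List.filter_cons, hcov', Bool.not_false, if_true, List.foldl_cons,
          hstep1, hstep2]
        exact pvGreedy_filter c rest (a + 1) (pvKey x) hkx
          (fun y hy => hk y (List.mem_cons_of_mem _ hy))

-- main invariant: A's pop-and-remove loop on a list sorted by descending exit time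
-- counts exactly what B's greedy pass over its reverse counts
lemma pvMainAux :
    ∀ (n : Nat) (D : List (List Int)), D.length ≤ n → ∀ (a : Int),
      D.Pairwise (fun x y => pvKey y ≤ pvKey x) →
      pvWhileLoop D a = ((D.reverse).foldl pvAltStep (a, none)).1 := by
  intro n
  induction n with
  | zero =>
      intro D hD a _
      have : D = [] := List.length_eq_zero_iff.1 (Nat.le_zero.1 hD)
      subst this
      rw [pvWhileLoop]
      split
      next h => simp
      next pr h =>
        have hn : PySem.List.pop? ([] : List (List Int)) = none := rfl
        rw [hn] at h
        cases h
  | succ n ih =>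
      intro D hD a hp
      cases hE : D.reverse with
      | nil =>
          have : D = [] := by simpa using congrArg List.reverse hE
          subst this
          rw [pvWhileLoop]
          split
          next h => simp
          next pr h =>
            have hn : PySem.List.pop? ([] : List (List Int)) = none := rfl
            rw [hn] at h
            cases h
      | cons p S =>
          have hDe : D = S.reverse ++ [p] := by
            have := congrArg List.reverse hE
            simpa using this
          -- unfold one iteration of A's while loop
          rw [hDe, pvWhileLoop]
          split
          next h => exact absurd (by rw [PySem.List.pop?_last] at h; exact h) (by simp)
          next pr h =>
          rw [PySem.List.pop?_last] at h
          obtain rfl : (p, S.reverse) = pr := Option.some.inj h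
          have hasc : List.Pairwise (fun x y => pvKey x ≤ pvKey y) (p :: S) := by
            rw [← hE]; exact List.pairwise_reverse.2 hp
          have hk : ∀ x ∈ S, pvKey p ≤ pvKey x :=
            fun x hx => (List.pairwise_cons.1 hasc).1 x hx
          have hSasc : List.Pairwise (fun x y => pvKey x ≤ pvKey y) S :=
            (List.pairwise_cons.1 hasc).2
          -- the inner removal pass is a filter
          rw [pvRemoveLoop_self]
          have hfr : (S.reverse).filter (fun r => !pvCov (pvKey p) r)
              = ((S.filter (fun r => !pvCov (pvKey p) r)).reverse) := List.filter_reverse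
          rw [hfr]
          -- induction hypothesis on the strictly shorter filtered list
          have hlen : ((S.filter (fun r => !pvCov (pvKey p) r)).reverse).length ≤ n := by
            have h1 : (S.filter (fun r => !pvCov (pvKey p) r)).length ≤ S.length :=
              List.length_filter_le _ _
            have h2 : D.length = S.length + 1 := by rw [hDe]; simp
            simp only [List.length_reverse]
            omega
          have hpair : ((S.filter (fun r => !pvCov (pvKey p) r)).reverse).Pairwise
              (fun x y => pvKey y ≤ pvKey x) :=
            List.pairwise_reverse.2 (List.Pairwise.sublist List.filter_sublist hSasc)
          rw [ih _ hlen _ hpair]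
          simp only [List.reverse_reverse, List.foldl_cons]
          have hstep : pvAltStep (a, none) p = (a + 1, some (pvKey p)) := by
            simp [pvAltStep, pvKey]
          rw [hstep]
          exact pvGreedy_start (pvKey p) S (a + 1) hk

lemma pvMain :
    ∀ (D : List (List Int)) (a : Int), D.Pairwise (fun x y => pvKey y ≤ pvKey x) →
      pvWhileLoop D a = ((D.reverse).foldl pvAltStep (a, none)).1 :=
  fun D => pvMainAux D.length D le_rfl

-- ===== VERDICT (by name: the statement is the Claim_ definition above) =====
theorem solution_spec : Claim_equal_solution := by
  intro routes _ _
  unfold Spec_solution solution solution_alt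
  exact pvMain _ 0 (PySem.List.sorted_pairwise_rev routes pvKey)
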